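-- pv_equiv track=rewrite | github.com/TurkuNLP/HTR-context-OCR | python_scripts/visualise_dorian_simple.py | longest_false_run
-- ===== SOURCE A (Python) =====
-- def longest_false_run(arr):
--     best = 0
--     run = 0
--     for v in arr:
--         if not v:
--             run += 1
--             best = max(best, run)
--         else:
--             run = 0
--     return best
-- ===== SOURCE B (Python) =====
-- def longest_false_run(arr):
--     # Two-pointer run scan: skip truthy elements, then measure each maximal
--     # falsy run in one inner sweep (instead of a counter-with-reset).
--     n = len(arr)
--     best = 0
--     i = 0
--     while i < n:
--         if arr[i]:
--             i += 1
--         else: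
--             j = i + 1
--             while j < n and not arr[j]:
--                 j += 1
--             if j - i > best:
--                 best = j - i
--             i = j
--     return best
-- ===== Notes on version B (the rewrite author's own statement) =====
-- stated objective: alternative
-- what changed: Replaces the running counter-with-reset fold by a two-pointer scan that skips truthy elements and measures each maximal falsy run with an inner sweep, keeping only the best run length.
import Mathlib
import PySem

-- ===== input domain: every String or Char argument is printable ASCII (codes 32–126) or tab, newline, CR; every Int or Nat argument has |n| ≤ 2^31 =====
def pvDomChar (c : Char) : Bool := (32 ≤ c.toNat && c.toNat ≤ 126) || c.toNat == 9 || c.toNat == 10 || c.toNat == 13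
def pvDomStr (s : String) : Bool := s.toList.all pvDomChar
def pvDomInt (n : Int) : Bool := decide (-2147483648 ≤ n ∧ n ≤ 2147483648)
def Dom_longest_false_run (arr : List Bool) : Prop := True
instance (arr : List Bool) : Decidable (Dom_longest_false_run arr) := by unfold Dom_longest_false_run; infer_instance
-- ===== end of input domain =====

-- B keeps the same return value but finds it by a different mechanism (two-pointer run scan); no speed claim.

-- ===== PORT A =====
-- A: fold over the elements with state (best, run); falsy extends the run and updates best, truthy resets.
def longest_false_run (arr : List Bool) : Int :=
  (arr.foldl (fun (s : Int × Int) v =>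
      if !v then (max s.1 (s.2 + 1), s.2 + 1) else (s.1, 0)) (0, 0)).1

-- ===== PORT B =====
-- B's inner sweep `while j < n and not arr[j]` on the current suffix: returns (run length, remaining suffix).
def pvSpanFalse : List Bool → Nat × List Bool
  | [] => (0, [])
  | true :: xs => (0, true :: xs)
  | false :: xs => let p := pvSpanFalse xs; (p.1 + 1, p.2)

theorem pvSpanFalse_len : ∀ xs : List Bool, (pvSpanFalse xs).2.length ≤ xs.length
  | [] => Nat.le_refl _
  | true :: xs => by simp [pvSpanFalse]
  | false :: xs => by
      simp only [pvSpanFalse, List.length_cons]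
      exact Nat.le_succ_of_le (pvSpanFalse_len xs)

-- B's outer while loop: skip a truthy element, or measure the falsy run and jump past it.
def pvAltGo : List Bool → Nat
  | [] => 0
  | true :: xs => pvAltGo xs
  | false :: xs =>
      let p := pvSpanFalse xs
      max (p.1 + 1) (pvAltGo p.2)
  termination_by ys => ys.length
  decreasing_by all_goals (have := pvSpanFalse_len xs; simp only [List.length_cons]; omega)

def longest_false_run_alt (arr : List Bool) : Int := (pvAltGo arr : Int)

-- ===== PRECONDITION & SPEC =====
def Spec_longest_false_run (arr : List Bool) (out : Int) : Prop := out = longest_false_run_alt arr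
instance (arr : List Bool) (out : Int) : Decidable (Spec_longest_false_run arr out) := by unfold Spec_longest_false_run; infer_instance

-- ===== CLAIM (what is proved, stated in full; the proofs are below) =====
def Claim_equal_longest_false_run : Prop := ∀ (arr : List Bool), Dom_longest_false_run arr → Spec_longest_false_run arr (longest_false_run arr)

-- ===== LEMMAS AND PROOFS =====

theorem pvAltGo_eq (ys : List Bool) :
    (pvAltGo ys : Int) = max ((pvSpanFalse ys).1 : Int) (pvAltGo (pvSpanFalse ys).2) := by
  cases ys with
  | nil => simp [pvAltGo, pvSpanFalse]
  | cons v zs =>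
    cases v with
    | true =>
        simp [pvAltGo, pvSpanFalse]
    | false =>
        simp [pvAltGo, pvSpanFalse]

theorem pv_fold_inv (xs : List Bool) : ∀ (best run : Int), run ≤ best → 0 ≤ run →
    (xs.foldl (fun (s : Int × Int) v =>
      if !v then (max s.1 (s.2 + 1), s.2 + 1) else (s.1, 0)) (best, run)).1
    = max best (max (run + ((pvSpanFalse xs).1 : Int)) (pvAltGo (pvSpanFalse xs).2)) := by
  induction xs with
  | nil => intro best run h1 h2; simp [pvSpanFalse, pvAltGo]; omega
  | cons v ys ih =>
    intro best run h1 h2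
    cases v with
    | false =>
        have h := ih (max best (run + 1)) (run + 1) (by omega) (by omega)
        simp only [List.foldl]
        rw [show (if (!false) = true then (max best (run + 1), run + 1) else (best, (0 : Int)))
              = (max best (run + 1), run + 1) from rfl, h]
        simp only [pvSpanFalse]
        push_cast
        omega
    | true =>
        have h := ih best 0 (by omega) (by omega)
        have heq := pvAltGo_eq ys
        simp only [List.foldl]
        rw [show (if (!true) = true then (max best (run + 1), run + 1) else (best, (0 : Int)))
              = (best, (0 : Int)) from rfl, h]
        simp only [pvSpanFalse, pvAltGo] at heq ⊢
        omega

-- ===== VERDICT (by name: the statement is the Claim_ definition above) =====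
theorem longest_false_run_spec : Claim_equal_longest_false_run := by
  intro arr _
  unfold Spec_longest_false_run longest_false_run longest_false_run_alt
  rw [pv_fold_inv arr 0 0 le_rfl le_rfl, pvAltGo_eq arr]
  omega
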